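-- pv_equiv track=rewrite | github.com/dephan0/Advent-Of-Code-2022 | day15/task1.py | get_surrounding_positions
-- ===== SOURCE A (Python) =====
-- def get_distance(pos1, pos2):
--     return abs(pos1[0] - pos2[0]) + abs(pos1[1] - pos2[1])
--
-- def get_surrounding_positions(pair):
--     sensor, beacon = pair
--     # positions = []
--     distance = get_distance(sensor, beacon)
--
--     start_pos = (sensor[0], sensor[1] - distance - 1)
--     next_pos = start_pos
--     yield next_pos
--
--     for _ in range(distance + 1):
--         next_pos = (next_pos[0] + 1, next_pos[1] + 1)
--         yield next_pos
--
--     for _ in range(distance + 1):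
--         next_pos = (next_pos[0] - 1, next_pos[1] + 1)
--         yield next_pos
--
--     for _ in range(distance + 1):
--         next_pos = (next_pos[0] - 1, next_pos[1] - 1)
--         yield next_pos
--
--     for _ in range(distance):
--         next_pos = (next_pos[0] + 1, next_pos[1] - 1)
--         yield next_pos
-- ===== SOURCE B (Python) =====
-- def get_surrounding_positions(pair):
--     (sx, sy), (bx, by) = pair
--     r = abs(sx - bx) + abs(sy - by) + 1
--     for t in range(4 * r):
--         edge, o = divmod(t, r)
--         if edge == 0:
--             yield (sx + o, sy - r + o)
--         elif edge == 1:
--             yield (sx + r - o, sy + o)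
--         elif edge == 2:
--             yield (sx - o, sy + r - o)
--         else:
--             yield (sx - r + o, sy - o)
-- ===== Notes on version B (the rewrite author's own statement) =====
-- stated objective: alternative
-- what changed: Replaces the four sequential walk loops that thread a running next_pos with a single indexed loop over range(4*(distance+1)) whose body derives each perimeter point in closed form from divmod(t, distance+1).
import Mathlib
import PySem

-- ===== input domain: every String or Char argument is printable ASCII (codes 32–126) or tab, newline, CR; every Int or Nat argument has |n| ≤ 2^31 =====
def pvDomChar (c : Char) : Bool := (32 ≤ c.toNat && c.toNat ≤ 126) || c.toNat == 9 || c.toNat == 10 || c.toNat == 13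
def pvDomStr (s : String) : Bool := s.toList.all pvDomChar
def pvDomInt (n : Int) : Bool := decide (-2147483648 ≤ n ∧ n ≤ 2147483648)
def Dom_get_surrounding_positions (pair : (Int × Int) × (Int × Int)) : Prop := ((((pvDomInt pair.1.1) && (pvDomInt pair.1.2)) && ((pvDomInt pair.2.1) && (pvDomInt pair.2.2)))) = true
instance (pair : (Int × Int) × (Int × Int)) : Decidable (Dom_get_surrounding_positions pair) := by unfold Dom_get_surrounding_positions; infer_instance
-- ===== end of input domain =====

-- B replaces A's four sequential walk loops threading next_pos by a single indexed
-- loop with a closed-form index→coordinate map (objective: alternative decomposition).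
-- A is a generator in Python; both ports return the list of yielded values.

-- ===== PORT A =====
def get_distance (pos1 pos2 : Int × Int) : Int :=
  |pos1.1 - pos2.1| + |pos1.2 - pos2.2|

-- one 'for _ in range(n): next_pos = next_pos + (dx,dy); yield next_pos' loop:
-- returns the yielded list and the final next_pos
def pvWalk (pos : Int × Int) (dx dy : Int) : Nat → List (Int × Int) × (Int × Int)
  | 0 => ([], pos)
  | n+1 =>
    let p := (pos.1 + dx, pos.2 + dy)
    let rest := pvWalk p dx dy n
    (p :: rest.1, rest.2)

def get_surrounding_positions (pair : (Int × Int) × (Int × Int)) : List (Int × Int) :=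
  let sensor := pair.1
  let beacon := pair.2
  let distance := get_distance sensor beacon
  let start_pos := (sensor.1, sensor.2 - distance - 1)
  let s1 := pvWalk start_pos 1 1 (distance + 1).toNat
  let s2 := pvWalk s1.2 (-1) 1 (distance + 1).toNat
  let s3 := pvWalk s2.2 (-1) (-1) (distance + 1).toNat
  let s4 := pvWalk s3.2 1 (-1) distance.toNat
  start_pos :: (s1.1 ++ s2.1 ++ s3.1 ++ s4.1)

-- ===== PORT B =====
def get_surrounding_positions_alt (pair : (Int × Int) × (Int × Int)) : List (Int × Int) :=
  let sx := pair.1.1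
  let sy := pair.1.2
  let bx := pair.2.1
  let by' := pair.2.2
  let r := |sx - bx| + |sy - by'| + 1
  (PySem.List.pyRange 0 (4 * r) 1).map (fun t =>
    let edge := PySem.Int.floordiv t r
    let o := PySem.Int.mod t r
    if edge = 0 then (sx + o, sy - r + o)
    else if edge = 1 then (sx + r - o, sy + o)
    else if edge = 2 then (sx - o, sy + r - o)
    else (sx - r + o, sy - o))

-- ===== PRECONDITION & SPEC =====
def Spec_get_surrounding_positions (pair : (Int × Int) × (Int × Int)) (out : List (Int × Int)) : Prop := out = get_surrounding_positions_alt pair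
instance (pair : (Int × Int) × (Int × Int)) (out : List (Int × Int)) : Decidable (Spec_get_surrounding_positions pair out) := by unfold Spec_get_surrounding_positions; infer_instance

-- ===== CLAIM (what is proved, stated in full; the proofs are below) =====
def Claim_equal_get_surrounding_positions : Prop := ∀ (pair : (Int × Int) × (Int × Int)), Dom_get_surrounding_positions pair → Spec_get_surrounding_positions pair (get_surrounding_positions pair)

-- ===== LEMMAS AND PROOFS =====

-- characterisation of one walk loop
theorem pvWalk_eq (dx dy : Int) : ∀ (n : Nat) (pos : Int × Int),
    pvWalk pos dx dy n =
      ((List.range n).map (fun (k : Nat) => (pos.1 + ((k : Int) + 1) * dx, pos.2 + ((k : Int) + 1) * dy)),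
       (pos.1 + (n : Int) * dx, pos.2 + (n : Int) * dy)) := by
  intro n
  induction n with
  | zero => intro pos; simp [pvWalk]
  | succ m ih =>
    intro pos
    simp only [pvWalk, ih]
    rw [Prod.ext_iff]
    constructor
    · show _ :: _ = _
      rw [List.range_succ_eq_map]
      simp only [List.map_cons, List.map_map]
      refine List.cons_eq_cons.mpr ⟨?_, ?_⟩
      · rw [Prod.ext_iff]; push_cast
        exact ⟨by ring, by ring⟩
      · apply List.map_congr_left
        intro k _
        simp only [Function.comp]
        rw [Prod.ext_iff]; push_cast
        exact ⟨by ring, by ring⟩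
    · show (_, _) = (_, _)
      rw [Prod.ext_iff]; push_cast
      exact ⟨by ring, by ring⟩

-- the canonical list both ports compute: index k ↦ k-th clockwise perimeter point
def pvCanon (sx sy r : Int) (N : Nat) : List (Int × Int) :=
  (List.range (4 * N)).map (fun (k : Nat) =>
    if k < N then (sx + (k : Int), sy - r + (k : Int))
    else if k < 2 * N then (sx + r - ((k : Int) - (N : Int)), sy + ((k : Int) - (N : Int)))
    else if k < 3 * N then (sx - ((k : Int) - 2 * (N : Int)), sy + r - ((k : Int) - 2 * (N : Int)))
    else (sx - r + ((k : Int) - 3 * (N : Int)), sy - ((k : Int) - 3 * (N : Int))))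

theorem get_surrounding_positions_spec : Claim_equal_get_surrounding_positions := by
  intro pair _
  obtain ⟨⟨sx, sy⟩, bx, by'⟩ := pair
  show get_surrounding_positions ((sx, sy), (bx, by')) =
       get_surrounding_positions_alt ((sx, sy), (bx, by'))
  set d : Int := |sx - bx| + |sy - by'| with hd_def
  have hd : 0 ≤ d := by positivity
  set N : Nat := (d + 1).toNat with hN_def
  have hN : (N : Int) = d + 1 := by omega
  have hNpos : 0 < N := by omega
  -- A equals the canonical list
  have hA : get_surrounding_positions ((sx, sy), (bx, by')) = pvCanon sx sy (d + 1) N := by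
    show (let sensor := (sx, sy); let beacon := (bx, by');
          let distance := get_distance sensor beacon
          let start_pos := (sensor.1, sensor.2 - distance - 1)
          let s1 := pvWalk start_pos 1 1 (distance + 1).toNat
          let s2 := pvWalk s1.2 (-1) 1 (distance + 1).toNat
          let s3 := pvWalk s2.2 (-1) (-1) (distance + 1).toNat
          let s4 := pvWalk s3.2 1 (-1) distance.toNat
          start_pos :: (s1.1 ++ s2.1 ++ s3.1 ++ s4.1)) = pvCanon sx sy (d + 1) N
    have hgd : get_distance (sx, sy) (bx, by') = d := rfl
    simp only [hgd, pvWalk_eq]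
    have h1 : (d + 1).toNat = N := rfl
    have h2 : d.toNat = N - 1 := by omega
    have h2' : ((N - 1 : Nat) : Int) = d := by omega
    rw [h1, h2]
    -- canonical list split: 4N = 1 + N + N + N + (N-1)
    have hsplit : 4 * N = 1 + (N + (N + (N + (N - 1)))) := by omega
    unfold pvCanon
    rw [hsplit, List.range_add, List.range_add, List.range_add, List.range_add]
    simp only [List.map_append, List.map_map, List.range_one, List.map_cons,
      List.cons_append, List.nil_append, List.append_assoc]
    have hif0 : (0 : Nat) < N := hNpos
    rw [if_pos hif0]
    simp only [hN_def]
    refine congrArg₂ _ (by simp; omega) (congrArg₂ _ ?_ (congrArg₂ _ ?_ (congrArg₂ _ ?_ ?_))) <;>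
    · apply List.map_congr_left
      intro k hk
      rw [List.mem_range] at hk
      simp only [Function.comp]
      have hkN : (k : Int) < (N : Int) := by omega
      split_ifs <;> simp only [Prod.mk.injEq] <;> push_cast <;> omega
  -- B equals the canonical list
  have hB : get_surrounding_positions_alt ((sx, sy), (bx, by')) = pvCanon sx sy (d + 1) N := by
    show (PySem.List.pyRange 0 (4 * (d + 1)) 1).map _ = _
    rw [PySem.List.pyRange_one]
    have hlen : (4 * (d + 1) - 0).toNat = 4 * N := by omega
    rw [hlen, List.map_map]
    unfold pvCanon
    apply List.map_congr_left
    intro k hk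
    rw [List.mem_range] at hk
    simp only [Function.comp, zero_add]
    have hd1 : |sx - bx| + |sy - by'| + 1 = d + 1 := by rw [hd_def]
    rw [hd1]
    have hr : (0 : Int) < d + 1 := by omega
    -- determine the edge index i = k / N
    rcases Nat.lt_or_ge k N with h | h
    · have hfd : PySem.Int.floordiv ((k : Int)) (d + 1) = 0 := by
        rw [PySem.Int.floordiv_eq_iff_of_pos hr]; constructor <;> push_cast <;> omega
      have hmd : PySem.Int.mod ((k : Int)) (d + 1) = (k : Int) := by
        have := PySem.Int.floordiv_mul_add_mod ((k : Int)) (d + 1)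
        rw [hfd] at this; omega
      rw [hfd, hmd, if_pos rfl, if_pos h]
    · rcases Nat.lt_or_ge k (2 * N) with h2 | h2
      · have hfd : PySem.Int.floordiv ((k : Int)) (d + 1) = 1 := by
          rw [PySem.Int.floordiv_eq_iff_of_pos hr]; constructor <;> push_cast <;> omega
        have hmd : PySem.Int.mod ((k : Int)) (d + 1) = (k : Int) - (d + 1) := by
          have := PySem.Int.floordiv_mul_add_mod ((k : Int)) (d + 1)
          rw [hfd] at this; omega
        rw [hfd, hmd, if_neg (show ((1:Int) ≠ 0) by norm_num), if_pos rfl,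
            if_neg (show ¬ k < N by omega), if_pos h2]
        exact Prod.ext_iff.mpr ⟨by omega, by omega⟩
      · rcases Nat.lt_or_ge k (3 * N) with h3 | h3
        · have hfd : PySem.Int.floordiv ((k : Int)) (d + 1) = 2 := by
            rw [PySem.Int.floordiv_eq_iff_of_pos hr]; constructor <;> push_cast <;> omega
          have hmd : PySem.Int.mod ((k : Int)) (d + 1) = (k : Int) - 2 * (d + 1) := by
            have := PySem.Int.floordiv_mul_add_mod ((k : Int)) (d + 1)
            rw [hfd] at this; omega
          rw [hfd, hmd, if_neg (show ((2:Int) ≠ 0) by norm_num),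
              if_neg (show ((2:Int) ≠ 1) by norm_num), if_pos rfl,
              if_neg (show ¬ k < N by omega), if_neg (show ¬ k < 2 * N by omega), if_pos h3]
          exact Prod.ext_iff.mpr ⟨by omega, by omega⟩
        · have hfd : PySem.Int.floordiv ((k : Int)) (d + 1) = 3 := by
            rw [PySem.Int.floordiv_eq_iff_of_pos hr]; constructor <;> push_cast <;> omega
          have hmd : PySem.Int.mod ((k : Int)) (d + 1) = (k : Int) - 3 * (d + 1) := by
            have := PySem.Int.floordiv_mul_add_mod ((k : Int)) (d + 1)
            rw [hfd] at this; omega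
          rw [hfd, hmd, if_neg (show ((3:Int) ≠ 0) by norm_num),
              if_neg (show ((3:Int) ≠ 1) by norm_num), if_neg (show ((3:Int) ≠ 2) by norm_num),
              if_neg (show ¬ k < N by omega), if_neg (show ¬ k < 2 * N by omega),
              if_neg (show ¬ k < 3 * N by omega)]
          exact Prod.ext_iff.mpr ⟨by omega, by omega⟩
  show get_surrounding_positions ((sx, sy), (bx, by')) = get_surrounding_positions_alt ((sx, sy), (bx, by'))
  rw [hA, hB]
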